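-- pv_equiv track=rewrite | github.com/xieruishen/GeneFinder | gene_finder.py | find_stop_codon
-- ===== SOURCE A (Python) =====
-- def find_stop_codon(dna):
--     """Takes a DNA sequence and search for a stop codon 'TAG' or 'TAA' or 'TGA'.
--     If there is a stop codon, returns index of first letter of stop codon.
--     If there is no stop codon, return index of the last letter in the sequence.
--     >>> find_stop_codon("ATTCTAGCC")
--     4
--     >>> find_stop_codon("ATTCTACTAAGCC")
--     7
--     >>> find_stop_codon("CTACTGGATGACC")
--     8
--     >>> find_stop_codon("CCTCGGCTACG")
--     11
--     """
--     index = 0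
--     while index < len(dna):
--         if dna[index:index+3] == 'TAG':
--             return index
--         elif dna[index:index+3] == 'TAA':
--             return index
--         elif dna[index:index+3] == 'TGA':
--             return index
--         index = index + 1
--     return len(dna)
--     pass
-- ===== SOURCE B (Python) =====
-- def find_stop_codon(dna):
--     hits = [i for i in (dna.find('TAG'), dna.find('TAA'), dna.find('TGA')) if i != -1]
--     return min(hits) if hits else len(dna)
-- ===== Notes on version B (the rewrite author's own statement) =====
-- stated objective: faster
-- what changed: Replaces the manual index-by-index window scan with three independent str.find scans combined by taking the minimum of the non-(-1) results, falling back to len(dna).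
import Mathlib
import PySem

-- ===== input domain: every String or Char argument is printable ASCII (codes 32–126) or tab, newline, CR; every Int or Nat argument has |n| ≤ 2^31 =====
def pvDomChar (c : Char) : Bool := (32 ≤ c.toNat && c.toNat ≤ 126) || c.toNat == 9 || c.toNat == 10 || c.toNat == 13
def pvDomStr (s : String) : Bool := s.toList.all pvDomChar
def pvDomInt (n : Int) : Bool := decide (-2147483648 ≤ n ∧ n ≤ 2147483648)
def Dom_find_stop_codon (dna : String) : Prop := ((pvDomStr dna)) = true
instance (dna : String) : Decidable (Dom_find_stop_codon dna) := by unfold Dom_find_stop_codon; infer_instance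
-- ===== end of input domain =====

-- B replaces A's single interleaved left-to-right window scan with three independent
-- str.find scans combined by a minimum (idiomatic; return value only, no mutation).

-- ===== PORT A =====
-- the while loop: index counts up, each step compares the slice dna[index:index+3]
def findStopGo (l : List Char) (index : Nat) : Int :=
  if index < l.length then
    if PySem.List.slice l (some (index : Int)) (some ((index : Int) + 3)) = "TAG".toList then (index : Int)
    else if PySem.List.slice l (some (index : Int)) (some ((index : Int) + 3)) = "TAA".toList then (index : Int)
    else if PySem.List.slice l (some (index : Int)) (some ((index : Int) + 3)) = "TGA".toList then (index : Int)
    else findStopGo l (index + 1)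
  else (l.length : Int)
termination_by l.length - index

def find_stop_codon (dna : String) : Int := findStopGo dna.toList 0

-- ===== PORT B =====
def find_stop_codon_alt (dna : String) : Int :=
  let hits := [PySem.Str.find dna "TAG", PySem.Str.find dna "TAA", PySem.Str.find dna "TGA"].filter (fun i => i ≠ -1)
  match PySem.List.min? hits (fun x => x) with
  | some m => m
  | none => (PySem.Str.len dna : Int)

-- ===== PRECONDITION & SPEC =====
def Spec_find_stop_codon (dna : String) (out : Int) : Prop := out = find_stop_codon_alt dna
instance (dna : String) (out : Int) : Decidable (Spec_find_stop_codon dna out) := by unfold Spec_find_stop_codon; infer_instance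

-- ===== CLAIM (what is proved, stated in full; the proofs are below) =====
def Claim_equal_find_stop_codon : Prop := ∀ (dna : String), Dom_find_stop_codon dna → Spec_find_stop_codon dna (find_stop_codon dna)

-- ===== LEMMAS AND PROOFS =====

-- a stop codon starts at position j
def StopAt (l : List Char) (j : Nat) : Prop :=
  "TAG".toList <+: l.drop j ∨ "TAA".toList <+: l.drop j ∨ "TGA".toList <+: l.drop j

theorem slice3_eq_iff (l : List Char) (j : Nat) (c : List Char) (hc : c.length = 3) :
    PySem.List.slice l (some (j : Int)) (some ((j : Int) + 3)) = c ↔ c <+: l.drop j := by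
  have h3 : ((j : Int) + 3) = ((j : Int) + ((3 : Nat) : Int)) := by push_cast; ring
  rw [h3, PySem.List.slice_natCast_add]
  constructor
  · intro h; rw [← h]; exact List.take_prefix _ _
  · intro h
    have := List.prefix_iff_eq_take.mp h
    rw [hc] at this; exact this.symm

theorem notSlice (l : List Char) (idx : Nat) (hno : ¬ StopAt l idx) :
    ¬ PySem.List.slice l (some (idx : Int)) (some ((idx : Int) + 3)) = "TAG".toList ∧
    ¬ PySem.List.slice l (some (idx : Int)) (some ((idx : Int) + 3)) = "TAA".toList ∧
    ¬ PySem.List.slice l (some (idx : Int)) (some ((idx : Int) + 3)) = "TGA".toList := by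
  refine ⟨?_, ?_, ?_⟩ <;> rw [slice3_eq_iff l idx _ rfl] <;> intro hp <;>
    exact hno (by unfold StopAt; tauto)

theorem go_none (l : List Char) (hnone : ∀ j, ¬ StopAt l j) :
    ∀ idx, findStopGo l idx = (l.length : Int) := by
  have H : ∀ k idx, l.length - idx ≤ k → findStopGo l idx = (l.length : Int) := by
    intro k
    induction k with
    | zero =>
      intro idx h
      rw [findStopGo, if_neg (by omega)]
    | succ k ih =>
      intro idx h
      by_cases hlt : idx < l.length
      · obtain ⟨h1, h2, h3⟩ := notSlice l idx (hnone idx)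
        rw [findStopGo, if_pos hlt, if_neg h1, if_neg h2, if_neg h3]
        exact ih (idx + 1) (by omega)
      · rw [findStopGo, if_neg hlt]
  intro idx; exact H (l.length - idx) idx le_rfl

theorem go_min (l : List Char) (m : Nat) (hm : m < l.length) (hP : StopAt l m)
    (hmin : ∀ j, j < m → ¬ StopAt l j) :
    findStopGo l 0 = (m : Int) := by
  have H : ∀ k idx, idx ≤ m → m - idx ≤ k → findStopGo l idx = (m : Int) := by
    intro k
    induction k with
    | zero =>
      intro idx hidx h
      have he : idx = m := by omega
      subst he
      rw [findStopGo, if_pos hm]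
      rcases hP with hp | hp | hp
      · rw [if_pos ((slice3_eq_iff l idx _ rfl).mpr hp)]
      · by_cases h1 : PySem.List.slice l (some (idx : Int)) (some ((idx : Int) + 3)) = "TAG".toList
        · rw [if_pos h1]
        · rw [if_neg h1, if_pos ((slice3_eq_iff l idx _ rfl).mpr hp)]
      · by_cases h1 : PySem.List.slice l (some (idx : Int)) (some ((idx : Int) + 3)) = "TAG".toList
        · rw [if_pos h1]
        · by_cases h2 : PySem.List.slice l (some (idx : Int)) (some ((idx : Int) + 3)) = "TAA".toList
          · rw [if_neg h1, if_pos h2]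
          · rw [if_neg h1, if_neg h2, if_pos ((slice3_eq_iff l idx _ rfl).mpr hp)]
    | succ k ih =>
      intro idx hidx h
      by_cases he : idx = m
      · exact ih idx hidx (by omega)
      · have hidx' : idx < m := lt_of_le_of_ne hidx he
        obtain ⟨h1, h2, h3⟩ := notSlice l idx (hmin idx hidx')
        rw [findStopGo, if_pos (by omega), if_neg h1, if_neg h2, if_neg h3]
        exact ih (idx + 1) hidx' (by omega)
  exact H m 0 (Nat.zero_le _) (by omega)

-- occurrence somewhere ↔ find ≠ -1, stated via drop/prefix
theorem find_ne_neg_one_of_prefix_drop (l sub : List Char) (j : Nat) (h : sub <+: l.drop j) :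
    PySem.Chars.find l sub ≠ -1 := by
  rw [PySem.Chars.find_ne_neg_one_iff]
  exact (h.isInfix).trans (List.drop_suffix j l).isInfix

theorem not_prefix_drop_of_find_neg (l sub : List Char) (h : PySem.Chars.find l sub = -1) :
    ∀ j, ¬ sub <+: l.drop j := by
  intro j hp
  exact find_ne_neg_one_of_prefix_drop l sub j hp h

-- ===== VERDICT (by name: the statement is the Claim_ definition above) =====
theorem find_stop_codon_spec : Claim_equal_find_stop_codon := by
  intro dna _
  unfold Spec_find_stop_codon find_stop_codon find_stop_codon_alt
  simp only [PySem.Str.find_eq, PySem.Str.len_eq]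
  set l := dna.toList with hl
  set f1 := PySem.Chars.find l "TAG".toList with hf1
  set f2 := PySem.Chars.find l "TAA".toList with hf2
  set f3 := PySem.Chars.find l "TGA".toList with hf3
  set hits := [f1, f2, f3].filter (fun i => i ≠ -1) with hhits
  rcases hmq : PySem.List.min? hits (fun x => x) with _ | m
  · show findStopGo l 0 = (l.length : Int)
    have hempty : hits = [] := by
      cases hh : hits with
      | nil => rfl
      | cons a t => rw [hh, PySem.List.min?_id_cons] at hmq; cases hmq
    have hall : f1 = -1 ∧ f2 = -1 ∧ f3 = -1 := by
      have h := List.filter_eq_nil_iff.mp (hhits ▸ hempty)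
      simp only [List.mem_cons, List.not_mem_nil, or_false, decide_not,
        Bool.not_eq_true', decide_eq_false_iff_not, not_not] at h
      exact ⟨h f1 (Or.inl rfl), h f2 (Or.inr (Or.inl rfl)), h f3 (Or.inr (Or.inr rfl))⟩
    have hnone : ∀ j, ¬ StopAt l j := by
      intro j hs
      rcases hs with hp | hp | hp
      · exact not_prefix_drop_of_find_neg l _ hall.1 j hp
      · exact not_prefix_drop_of_find_neg l _ hall.2.1 j hp
      · exact not_prefix_drop_of_find_neg l _ hall.2.2 j hp
    exact go_none l hnone 0
  · show findStopGo l 0 = m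
    have hmem := PySem.List.min?_mem hmq
    have hmin := PySem.List.min?_isMin hmq
    have hm3 : (m = f1 ∨ m = f2 ∨ m = f3) ∧ m ≠ -1 := by
      rw [hhits] at hmem
      simp only [List.mem_filter, List.mem_cons, List.not_mem_nil, or_false] at hmem
      exact ⟨hmem.1, by simpa using hmem.2⟩
    have hsub : ∃ sub : List Char, sub.length = 3 ∧ PySem.Chars.find l sub = m ∧
        (∀ j, sub <+: l.drop j → StopAt l j) := by
      rcases hm3.1 with h | h | h
      · exact ⟨"TAG".toList, rfl, h.symm, fun j hp => Or.inl hp⟩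
      · exact ⟨"TAA".toList, rfl, h.symm, fun j hp => Or.inr (Or.inl hp)⟩
      · exact ⟨"TGA".toList, rfl, h.symm, fun j hp => Or.inr (Or.inr hp)⟩
    rcases hsub with ⟨sub, hlen, hfind, hstop⟩
    have hm0 : 0 ≤ m := by
      have := PySem.Chars.neg_one_le_find (s := l) (sub := sub)
      rw [hfind] at this
      rcases lt_or_eq_of_le this with h | h
      · omega
      · exact absurd h.symm hm3.2
    have hspec := PySem.Chars.find_spec (s := l) (sub := sub) (by rw [hfind]; exact hm0)
    rw [hfind] at hspec
    have hpref : sub <+: l.drop m.toNat := hspec.1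
    have hmlt : m.toNat < l.length := by
      have := hpref.length_le
      simp only [List.length_drop, hlen] at this
      omega
    have hP : StopAt l m.toNat := hstop _ hpref
    have hminP : ∀ j, j < m.toNat → ¬ StopAt l j := by
      intro j hj hs
      -- any codon at j would occur, so its find is in hits, so m ≤ it; but find's
      -- first-occurrence minimality forbids an occurrence before it, and j < m.toNat
      have key : ∀ c : List Char, (c = "TAG".toList ∨ c = "TAA".toList ∨ c = "TGA".toList) →
          c <+: l.drop j → False := by
        intro c hc hp
        have hne : PySem.Chars.find l c ≠ -1 := find_ne_neg_one_of_prefix_drop l c j hp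
        have hin : PySem.Chars.find l c ∈ hits := by
          rw [hhits]
          simp only [List.mem_filter, List.mem_cons, List.not_mem_nil, or_false]
          refine ⟨?_, by simpa using hne⟩
          rcases hc with h | h | h <;> subst h
          · exact Or.inl hf1.symm
          · exact Or.inr (Or.inl hf2.symm)
          · exact Or.inr (Or.inr hf3.symm)
        have hle : m ≤ PySem.Chars.find l c := hmin _ hin
        have h0c : 0 ≤ PySem.Chars.find l c := le_trans hm0 hle
        have hspecc := PySem.Chars.find_spec (s := l) (sub := c) h0c
        have hjlt : j < (PySem.Chars.find l c).toNat := by omega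
        exact hspecc.2 j hjlt hp
      rcases hs with hp | hp | hp
      · exact key _ (Or.inl rfl) hp
      · exact key _ (Or.inr (Or.inl rfl)) hp
      · exact key _ (Or.inr (Or.inr rfl)) hp
    rw [go_min l m.toNat hmlt hP hminP]
    omega
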